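-- pv_equiv track=rewrite | github.com/yonoho/pyalgorithm | c10_design/main.py | huffman_code
-- ===== SOURCE A (Python) =====
-- from typing import Dict, List, Tuple
--
-- def huffman_code(weighted_charset: List[Tuple[str, int]]) -> Dict[str, str]:
--     weighted_charset.sort(key=lambda x: x[1])
--     trees = []
--     for char, weight in weighted_charset:
--         trees.append({'v': char, 'w': weight})
--     while len(trees) > 1:
--         new_tree = {'l': trees[0], 'r': trees[1], 'w': trees[0]['w'] + trees[1]['w']}
--         trees = trees[2:] + [new_tree]
--         trees.sort(key=lambda x: x['w'])
--     return scan_code_tree(trees[0])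
--
-- def scan_code_tree(tree: dict, parent_codes: List[str] = []):
--     codes = {}
--     if tree.get('l'):
--         codes.update(scan_code_tree(tree['l'], parent_codes + ['0']))
--     if tree.get('r'):
--         codes.update(scan_code_tree(tree['r'], parent_codes + ['1']))
--     if tree.get('v'):
--         codes[tree['v']] = ''.join(parent_codes)
--     return codes
-- ===== SOURCE B (Python) =====
-- from typing import Dict, List, Tuple
--
--
-- def huffman_code(weighted_charset: List[Tuple[str, int]]) -> Dict[str, str]:
--     # Each node is a (weight, code_map) pair; merging the two lightest nodes
--     # prepends '0'/'1' to their codes, so no tree is built and no scan pass is needed.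
--     weighted_charset.sort(key=lambda x: x[1])
--     trees = [(weight, {char: ''}) for char, weight in weighted_charset]
--     while len(trees) > 1:
--         (w0, m0), (w1, m1) = trees[0], trees[1]
--         merged = {char: '0' + code for char, code in m0.items()}
--         merged.update({char: '1' + code for char, code in m1.items()})
--         trees = trees[2:] + [(w0 + w1, merged)]
--         trees.sort(key=lambda x: x[0])
--     return trees[0][1]
-- ===== Notes on version B (the rewrite author's own statement) =====
-- stated objective: alternative
-- what changed: B keeps the same sort-and-merge selection but carries each node as (weight, code_map) and builds the codes incrementally by prepending '0'/'1' at each merge, so there is no explicit tree and no recursive scan pass at the end; Pre_ excludes the empty list (IndexError) and inputs containing an empty-string symbol, a degenerate 'character' for which A's truthiness-based scan omits the entry while B codes it like any other symbol - neither value is specified for such a symbol.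
-- outside the precondition, e.g. on huffman_code([('', 1), ('a', 2)]): A returns {'a': '1'}, B returns {'': '0', 'a': '1'}
import Mathlib
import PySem

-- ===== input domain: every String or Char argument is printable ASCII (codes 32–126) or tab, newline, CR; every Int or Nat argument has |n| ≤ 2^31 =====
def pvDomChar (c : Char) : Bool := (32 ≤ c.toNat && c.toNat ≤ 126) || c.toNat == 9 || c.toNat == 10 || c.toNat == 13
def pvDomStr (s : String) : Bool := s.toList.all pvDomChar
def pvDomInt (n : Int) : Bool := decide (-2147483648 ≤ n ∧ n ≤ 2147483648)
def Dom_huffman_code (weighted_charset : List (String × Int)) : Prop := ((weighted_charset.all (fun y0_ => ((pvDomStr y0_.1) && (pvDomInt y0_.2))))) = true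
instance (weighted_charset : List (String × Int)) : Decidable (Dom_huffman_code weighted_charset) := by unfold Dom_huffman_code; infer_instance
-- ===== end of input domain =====

-- B replaces A's explicit tree dicts + recursive scan pass by nodes carried as (weight, code_map) pairs,
-- building the codes incrementally by prepending bits at each merge (same sort/merge selection; an
-- alternative of the same cost). Both Pythons sort the input list in place; the equivalence is
-- about the return value (B performs the same in-place sort).


-- ===== PORT A =====
-- a tree dict: {'v': char, 'w': weight} or {'l': tree, 'r': tree, 'w': weight}
inductive HTree where
  | leaf : String → Int → HTree
  | node : HTree → HTree → Int → HTree
deriving Repr, DecidableEq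

-- the 'w' field of a tree dict
def hw : HTree → Int
  | HTree.leaf _ w => w
  | HTree.node _ _ w => w

-- scan_code_tree: codes = {}; update with the left scan, then the right scan; then codes[v] = ''.join(parent_codes)
-- (a leaf dict has no 'l'/'r'; its 'v' is truthy exactly when the string is nonempty)
def scanA : HTree → List String → PySem.Dict String String
  | HTree.leaf v _, p =>
      if v ≠ "" then PySem.Dict.empty.insert v (PySem.Str.join "" p) else PySem.Dict.empty
  | HTree.node l r _, p =>
      ((PySem.Dict.empty.update (scanA l (p ++ ["0"])).items).update (scanA r (p ++ ["1"])).items)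

-- while len(trees) > 1: merge the first two, trees = trees[2:] + [new_tree], re-sort by 'w'.
-- fuel = the initial list length bounds the number of merges (each merge shortens the list by one).
def loopAF : Nat → List HTree → List HTree
  | fuel + 1, t0 :: t1 :: rest =>
      loopAF fuel (PySem.List.sorted (rest ++ [HTree.node t0 t1 (hw t0 + hw t1)]) hw false)
  | _, ts => ts

def loopA (ts : List HTree) : List HTree := loopAF ts.length ts

def huffman_code (weighted_charset : List (String × Int)) : List (String × String) :=
  let sortedW := PySem.List.sorted weighted_charset (fun x => x.2) false
  let trees := sortedW.foldl (fun acc cw => acc ++ [HTree.leaf cw.1 cw.2]) ([] : List HTree)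
  match loopA trees with
  | t :: _ => (scanA t []).items
  | [] => []   -- Python raises IndexError on trees[0] here; excluded by Pre_

-- ===== PORT B =====
-- {char: bit + code for char, code in m.items()}
def prefMap (bit : String) (m : PySem.Dict String String) : PySem.Dict String String :=
  PySem.Dict.ofList (m.items.map (fun q => (q.1, bit ++ q.2)))

-- while len(trees) > 1: merge the first two (weight, code_map) nodes, re-sort by weight.
-- fuel = the initial list length bounds the number of merges (each merge shortens the list by one).
def loopBF : Nat → List (Int × PySem.Dict String String) → List (Int × PySem.Dict String String)
  | fuel + 1, (w0, m0) :: (w1, m1) :: rest =>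
      loopBF fuel (PySem.List.sorted (rest ++ [(w0 + w1, (prefMap "0" m0).update (prefMap "1" m1).items)])
        (fun x => x.1) false)
  | _, ts => ts

def loopB (ts : List (Int × PySem.Dict String String)) : List (Int × PySem.Dict String String) :=
  loopBF ts.length ts

def huffman_code_alt (weighted_charset : List (String × Int)) : List (String × String) :=
  let sortedW := PySem.List.sorted weighted_charset (fun x => x.2) false
  -- [(w, {c: ''}) for c, w in ...]
  let trees := sortedW.map (fun cw => (cw.2, PySem.Dict.empty.insert cw.1 ""))
  match loopB trees with
  | (_, m) :: _ => m.items
  | [] => []   -- Python raises IndexError on trees[0] here; excluded by Pre_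

-- ===== PRECONDITION & SPEC =====
-- Both Pythons raise IndexError on the empty list (trees[0] after the loop). Pre_ also excludes inputs
-- containing an empty-string symbol, a degenerate 'character' on which A's truthiness-based scan omits
-- the entry while B codes it like any other symbol - neither value is specified for such a symbol.
def Pre_huffman_code (weighted_charset : List (String × Int)) : Prop :=
  weighted_charset ≠ [] ∧ ∀ p ∈ weighted_charset, p.1 ≠ ""
instance (weighted_charset : List (String × Int)) : Decidable (Pre_huffman_code weighted_charset) := by
  unfold Pre_huffman_code; infer_instance
def pvWitness_huffman_code : (List (String × Int)) := [("a", 1), ("b", 2)]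

def Spec_huffman_code (weighted_charset : List (String × Int)) (out : List (String × String)) : Prop :=
  out = huffman_code_alt weighted_charset
instance (weighted_charset : List (String × Int)) (out : List (String × String)) : Decidable (Spec_huffman_code weighted_charset out) := by
  unfold Spec_huffman_code; infer_instance

-- ===== CLAIM (what is proved, stated in full; the proofs are below) =====
def Claim_equal_huffman_code : Prop := ∀ (weighted_charset : List (String × Int)), Dom_huffman_code weighted_charset → Pre_huffman_code weighted_charset → Spec_huffman_code weighted_charset (huffman_code weighted_charset)

-- ===== LEMMAS AND PROOFS =====

-- map a function over the VALUES of a dict (keys untouched)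
def mapVal (f : String → String) (d : PySem.Dict String String) : PySem.Dict String String :=
  PySem.Dict.mk (d.items.map (fun q => (q.1, f q.2)))

-- B's view of an A-tree: its weight and its code map
def gT (t : HTree) : Int × PySem.Dict String String := (hw t, scanA t [])

lemma contains_mapVal (f : String → String) (d : PySem.Dict String String) (k : String) :
    (mapVal f d).contains k = d.contains k := by
  simp [mapVal, PySem.Dict.contains, List.any_map, Function.comp_def]

lemma mapVal_insert (f : String → String) (d : PySem.Dict String String) (k : String) (v : String) :
    mapVal f (d.insert k v) = (mapVal f d).insert k (f v) := by
  rw [PySem.Dict.insert, PySem.Dict.insert, contains_mapVal]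
  by_cases h : d.contains k = true
  · rw [if_pos h, if_pos h]
    simp only [mapVal, List.map_map]
    congr 1
    apply List.map_congr_left
    intro q hq
    by_cases hk : q.1 = k <;> simp [hk]
  · rw [if_neg h, if_neg h]
    simp [mapVal]

lemma mapVal_update (f : String → String) (d : PySem.Dict String String) (ps : List (String × String)) :
    mapVal f (d.update ps) = (mapVal f d).update (ps.map (fun q => (q.1, f q.2))) := by
  induction ps generalizing d with
  | nil => simp [PySem.Dict.update]
  | cons p t ih =>
      simp only [PySem.Dict.update, List.foldl_cons, List.map_cons] at ih ⊢
      rw [ih (d.insert p.1 p.2), mapVal_insert]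

lemma flatten_intersperse_nil (L : List (List Char)) : (List.intersperse [] L).flatten = L.flatten := by
  induction L with
  | nil => rfl
  | cons x t ih =>
    cases t with
    | nil => rfl
    | cons y u => simp [List.intersperse] at ih ⊢; simpa using ih

lemma join_empty_eq_flatten (l : List String) :
    PySem.Str.join "" l = String.ofList ((l.map String.toList).flatten) := by
  simp [PySem.Str.join, PySem.Chars.join, List.intercalate, flatten_intersperse_nil]

lemma join_append_singleton (p : List String) (b : String) :
    PySem.Str.join "" (p ++ [b]) = PySem.Str.join "" p ++ b := by
  simp [join_empty_eq_flatten, String.ofList_append]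

lemma mapVal_empty (f : String → String) : mapVal f PySem.Dict.empty = PySem.Dict.empty := rfl

lemma items_mapVal (f : String → String) (d : PySem.Dict String String) :
    (mapVal f d).items = d.items.map (fun q => (q.1, f q.2)) := rfl

-- prefix shift: scanning under parent codes p prepends ''.join(p) to every code
lemma scanA_shift (t : HTree) (p : List String) :
    scanA t p = mapVal (fun s => PySem.Str.join "" p ++ s) (scanA t []) := by
  induction t generalizing p with
  | leaf v w =>
      simp only [scanA]
      split
      · rw [mapVal_insert, mapVal_empty]
        have h : PySem.Str.join "" ([] : List String) = "" := rfl
        rw [h, String.append_empty]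
      · rw [mapVal_empty]
  | node l r w ihl ihr =>
      show (PySem.Dict.empty.update (scanA l (p ++ ["0"])).items).update (scanA r (p ++ ["1"])).items
          = mapVal _ ((PySem.Dict.empty.update (scanA l ([] ++ ["0"])).items).update (scanA r ([] ++ ["1"])).items)
      rw [mapVal_update, mapVal_update, ihl (p ++ ["0"]), ihr (p ++ ["1"]),
        ihl ([] ++ ["0"]), ihr ([] ++ ["1"]), mapVal_empty]
      simp only [items_mapVal, List.map_map, Function.comp_def]
      have h0 : ∀ s, PySem.Str.join "" p ++ (PySem.Str.join "" (([] : List String) ++ ["0"]) ++ s)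
          = PySem.Str.join "" (p ++ ["0"]) ++ s := by
        intro s
        have hb : PySem.Str.join "" (["0"] : List String) = "0" := rfl
        simp [join_append_singleton, hb, String.append_assoc]
      have h1 : ∀ s, PySem.Str.join "" p ++ (PySem.Str.join "" (([] : List String) ++ ["1"]) ++ s)
          = PySem.Str.join "" (p ++ ["1"]) ++ s := by
        intro s
        have hb : PySem.Str.join "" (["1"] : List String) = "1" := rfl
        simp [join_append_singleton, hb, String.append_assoc]
      congr 1
      · congr 1
        apply List.map_congr_left; intro q hq; rw [h0 q.2]
      · apply List.map_congr_left; intro q hq; rw [h1 q.2]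

lemma items_ofList_of_nodup (ps : List (String × String)) (h : (ps.map Prod.fst).Nodup) :
    (PySem.Dict.ofList ps).items = ps := by
  have := PySem.Dict.items_foldl_insert_fresh ps Prod.fst Prod.snd PySem.Dict.empty
    (fun a _ => PySem.Dict.contains_empty a.1) h
  simpa [PySem.Dict.ofList, PySem.Dict.update] using this

lemma nodup_keys_scanA (t : HTree) (p : List String) : (scanA t p).keys.Nodup := by
  induction t generalizing p with
  | leaf v w =>
      simp only [scanA]
      split
      · exact PySem.Dict.nodup_keys_insert _ _ _ PySem.Dict.nodup_keys_empty
      · exact PySem.Dict.nodup_keys_empty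
  | node l r w ihl ihr =>
      exact PySem.Dict.nodup_keys_update _ _
        (PySem.Dict.nodup_keys_update _ _ PySem.Dict.nodup_keys_empty)

-- one merge: the scan of the merged tree IS B's merged code map
lemma gT_node (t0 t1 : HTree) (w : Int) :
    scanA (HTree.node t0 t1 w) []
      = (prefMap "0" (scanA t0 [])).update (prefMap "1" (scanA t1 [])).items := by
  show (PySem.Dict.empty.update (scanA t0 ([] ++ ["0"])).items).update (scanA t1 ([] ++ ["1"])).items = _
  rw [scanA_shift t0 ([] ++ ["0"]), scanA_shift t1 ([] ++ ["1"])]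
  have h0 : (fun s => PySem.Str.join "" (([] : List String) ++ ["0"]) ++ s) = (fun s => "0" ++ s) := rfl
  have h1 : (fun s => PySem.Str.join "" (([] : List String) ++ ["1"]) ++ s) = (fun s => "1" ++ s) := rfl
  rw [h0, h1]
  have hk : ((((scanA t1 []).items.map (fun q => (q.1, "1" ++ q.2))).map Prod.fst)).Nodup := by
    have := nodup_keys_scanA t1 []
    simpa [PySem.Dict.keys, List.map_map, Function.comp_def] using this
  show _ = (prefMap "0" (scanA t0 [])).update (PySem.Dict.ofList ((scanA t1 []).items.map (fun q => (q.1, "1" ++ q.2)))).items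
  rw [items_ofList_of_nodup _ hk]
  rfl

lemma insertBy_map (b : Int × PySem.Dict String String → Int × PySem.Dict String String → Bool)
    (b' : HTree → HTree → Bool) (h : ∀ x y, b (gT x) (gT y) = b' x y)
    (x : HTree) (acc : List HTree) :
    PySem.List.insertBy b (gT x) (acc.map gT) = (PySem.List.insertBy b' x acc).map gT := by
  induction acc with
  | nil => rfl
  | cons y t ih =>
      simp only [List.map_cons, PySem.List.insertBy, h x y]
      by_cases hb : b' x y = true
      · simp [hb]
      · simp only [Bool.not_eq_true] at hb
        simp [hb]
        exact ih

-- stable sorting by weight commutes with the tree → (weight, code_map) view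
lemma sorted_map_fst (l : List HTree) :
    PySem.List.sorted (l.map gT) (fun x => x.1) false = (PySem.List.sorted l hw false).map gT := by
  rw [PySem.List.sorted_eq_foldl_insertBy, PySem.List.sorted_eq_foldl_insertBy, List.foldl_map]
  have : ∀ (acc : List HTree),
      l.foldl (fun acc x => PySem.List.insertBy (fun a b => decide (a.1 < b.1)) (gT x) acc) (acc.map gT)
        = (l.foldl (fun acc x => PySem.List.insertBy (fun a b => decide (hw a < hw b)) x acc) acc).map gT := by
    induction l with
    | nil => intro acc; rfl
    | cons x t ih =>
        intro acc
        simp only [List.foldl_cons]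
        rw [insertBy_map (fun a b => decide (a.1 < b.1)) (fun a b => decide (hw a < hw b)) (fun _ _ => rfl)]
        exact ih _
  simpa using this []

-- the two merge loops stay in lockstep through the tree → (weight, code_map) view
lemma loop_comm (fuel : Nat) (ts : List HTree) :
    loopBF fuel (ts.map gT) = (loopAF fuel ts).map gT := by
  induction fuel generalizing ts with
  | zero => cases ts <;> rfl
  | succ n ih =>
      match ts with
      | [] => rfl
      | [t] => rfl
      | t0 :: t1 :: rest =>
          show loopBF (n + 1) (gT t0 :: gT t1 :: rest.map gT) = _
          rw [loopBF, loopAF]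
          have hm : (prefMap "0" (scanA t0 [])).update (prefMap "1" (scanA t1 [])).items
              = scanA (HTree.node t0 t1 (hw t0 + hw t1)) [] := (gT_node t0 t1 _).symm
          have hlist : rest.map gT ++ [((gT t0).1 + (gT t1).1, (prefMap "0" (gT t0).2).update (prefMap "1" (gT t1).2).items)]
              = (rest ++ [HTree.node t0 t1 (hw t0 + hw t1)]).map gT := by
            rw [List.map_append]
            congr 1
            show [(hw t0 + hw t1, (prefMap "0" (scanA t0 [])).update (prefMap "1" (scanA t1 [])).items)] = _
            rw [hm]
            rfl
          rw [hlist, sorted_map_fst]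
          exact ih _

lemma loopAF_ne_nil (fuel : Nat) (ts : List HTree) (h : ts ≠ []) : loopAF fuel ts ≠ [] := by
  induction fuel generalizing ts with
  | zero => cases ts with | nil => exact absurd rfl h | cons a t => simp [loopAF]
  | succ n ih =>
      match ts with
      | [t] => simp [loopAF]
      | t0 :: t1 :: rest =>
          rw [loopAF]
          apply ih
          rw [Ne, PySem.List.sorted_eq_nil_iff]
          simp

lemma main_eq (wcs : List (String × Int)) (hpre : wcs ≠ [])
    (hne : ∀ p ∈ wcs, p.1 ≠ "") :
    huffman_code wcs = huffman_code_alt wcs := by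
  unfold huffman_code huffman_code_alt
  simp only []
  set sortedW := PySem.List.sorted wcs (fun x => x.2) false with hsw
  have htrees : sortedW.foldl (fun acc cw => acc ++ [HTree.leaf cw.1 cw.2]) ([] : List HTree)
      = sortedW.map (fun cw => HTree.leaf cw.1 cw.2) := by
    simpa using PySem.List.foldl_append_singleton_eq_map (fun cw => HTree.leaf cw.1 cw.2) sortedW []
  have hB : sortedW.map (fun cw => (cw.2, PySem.Dict.empty.insert cw.1 ""))
      = (sortedW.map (fun cw => HTree.leaf cw.1 cw.2)).map gT := by
    rw [List.map_map]
    apply List.map_congr_left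
    intro cw hcw
    have hmem : cw ∈ wcs := (PySem.List.mem_sorted _ _ _ _).1 (hsw ▸ hcw)
    have hc : cw.1 ≠ "" := hne cw hmem
    simp [gT, hw, scanA, hc]
    rfl
  rw [htrees, hB]
  have hlen : ((sortedW.map (fun cw => HTree.leaf cw.1 cw.2)).map gT).length
      = (sortedW.map (fun cw => HTree.leaf cw.1 cw.2)).length := by simp
  rw [loopB, hlen, loop_comm]
  have hnn : sortedW.map (fun cw => HTree.leaf cw.1 cw.2) ≠ [] := by
    simp [hsw, PySem.List.sorted_eq_nil_iff, hpre]
  have := loopAF_ne_nil (sortedW.map (fun cw => HTree.leaf cw.1 cw.2)).length _ hnn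
  rw [← loopA] at this ⊢
  cases h : loopA (sortedW.map (fun cw => HTree.leaf cw.1 cw.2)) with
  | nil => exact absurd h this
  | cons t tl => rfl

-- ===== VERDICT (by name: the statement is the Claim_ definition above) =====
theorem huffman_code_spec : Claim_equal_huffman_code := by
  intro wcs _ hpre
  exact main_eq wcs hpre.1 hpre.2
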